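-- pv_equiv track=rewrite | github.com/horimpark/code-playground | codewars/6kyu/Help the bookseller !_horim.py | stock_list
-- ===== SOURCE A (Python) =====
-- def stock_list(stocklist, categories):
--     if not stocklist:
--         return ""
--
--     res = {x: 0 for x in categories}
--     for stock in stocklist:
--         name, count = stock.split(' ')[0], stock.split(' ')[1]
--         category = name[0]
--
--         if category in res:
--             res[category] += int(count)
--
--     res = dict(sorted(res.items()))
--     res = [f"({x} : {res[x]})" for x in categories]
--     return ' - '.join(res)
-- ===== SOURCE B (Python) =====
-- def stock_list(stocklist, categories):
--     if not stocklist: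
--         return ""
--     parts = []
--     for c in categories:
--         total = 0
--         for s in stocklist:
--             if s.split(' ')[0][0] == c:
--                 total += int(s.split(' ')[1])
--         parts.append(f"({c} : {total})")
--     return ' - '.join(parts)
-- ===== Notes on version B (the rewrite author's own statement) =====
-- stated objective: simpler
-- what changed: B drops A's pre-built accumulator dict and its sorted-items dict rebuild, instead computing each category's total by a fresh scan of the stocklist per category and formatting the output directly.
import Mathlib
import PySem

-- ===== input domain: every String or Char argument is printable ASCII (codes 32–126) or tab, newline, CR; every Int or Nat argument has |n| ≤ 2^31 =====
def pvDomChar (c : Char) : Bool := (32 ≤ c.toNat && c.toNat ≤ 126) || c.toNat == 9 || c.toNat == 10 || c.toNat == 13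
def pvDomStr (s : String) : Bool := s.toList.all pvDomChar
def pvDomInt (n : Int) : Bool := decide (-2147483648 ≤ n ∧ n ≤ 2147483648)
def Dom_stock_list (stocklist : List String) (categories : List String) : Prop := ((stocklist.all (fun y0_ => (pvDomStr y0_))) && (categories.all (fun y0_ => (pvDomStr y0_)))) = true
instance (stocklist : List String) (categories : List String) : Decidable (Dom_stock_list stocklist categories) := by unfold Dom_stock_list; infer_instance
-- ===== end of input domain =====

-- B replaces A's accumulator dict (and its sorted-items dict rebuild) by one fresh scan of the
-- stocklist per category; same return value, no speed claim.

-- shared parse helpers, used verbatim by both ports: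
-- stock.split(' '); its first element; stock.split(' ')[0][0] as a 1-char string; int(stock.split(' ')[1]).
-- The .getD defaults are reached only outside Pre_ (where the Python raises).
def pvFields (s : String) : List String := (PySem.Str.split? s " ").getD []
def pvName (s : String) : String := (pvFields s).getD 0 ""
def pvKey (s : String) : String := String.ofList [(PySem.Str.pyGet? (pvName s) 0).getD ' ']
def pvCnt (s : String) : Int := (PySem.Int.ofStr? ((pvFields s).getD 1 "")).getD 0

-- ===== PORT A =====
def stock_list (stocklist : List String) (categories : List String) : String :=
  if stocklist = [] then ""
  else
    let res0 : PySem.Dict String Int :=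
      categories.foldl (fun d x => d.insert x 0) PySem.Dict.empty
    let res : PySem.Dict String Int :=
      stocklist.foldl (fun d stock =>
        let category := pvKey stock
        if d.contains category then d.insert category (d.getD category 0 + pvCnt stock) else d) res0
    -- dict(sorted(res.items())): the dict's keys are unique, so Python's lexicographic
    -- tuple sort is exactly a sort by the key component (exact here).
    let res2 : PySem.Dict String Int :=
      PySem.Dict.ofList (PySem.List.sorted res.items (fun p => p.1))
    PySem.Str.join " - "
      (categories.map (fun x => "(" ++ x ++ " : " ++ PySem.Int.toStr (res2.getD x 0) ++ ")"))

-- ===== PORT B =====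
def stock_list_alt (stocklist : List String) (categories : List String) : String :=
  if stocklist = [] then ""
  else
    let parts : List String :=
      categories.foldl (fun acc c =>
        let total : Int :=
          stocklist.foldl (fun t s => if pvKey s == c then t + pvCnt s else t) 0
        acc ++ ["(" ++ c ++ " : " ++ PySem.Int.toStr total ++ ")"]) []
    PySem.Str.join " - " parts

-- ===== PRECONDITION & SPEC =====
-- Pre_ excludes exactly the inputs where the Python A raises: a stock entry whose
-- ' '-split has fewer than 2 fields (IndexError), an empty first field (IndexError on name[0]),
-- or — when its category letter is in `categories` — a count int() cannot parse (ValueError).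
def Pre_stock_list (stocklist : List String) (categories : List String) : Prop :=
  stocklist = [] ∨ ∀ s ∈ stocklist,
    2 ≤ (pvFields s).length ∧ pvName s ≠ "" ∧
    (pvKey s ∈ categories → (PySem.Int.ofStr? ((pvFields s).getD 1 "")).isSome = true)
instance (stocklist : List String) (categories : List String) : Decidable (Pre_stock_list stocklist categories) := by unfold Pre_stock_list; infer_instance
def pvWitness_stock_list : List String × List String := (["ABAR 200", "CDXE 500", "BKWR 250"], ["A", "B"])

def Spec_stock_list (stocklist : List String) (categories : List String) (out : String) : Prop := out = stock_list_alt stocklist categories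
instance (stocklist : List String) (categories : List String) (out : String) : Decidable (Spec_stock_list stocklist categories out) := by unfold Spec_stock_list; infer_instance

-- ===== CLAIM (what is proved, stated in full; the proofs are below) =====
def Claim_equal_stock_list : Prop := ∀ (stocklist : List String) (categories : List String), Dom_stock_list stocklist categories → Pre_stock_list stocklist categories → Spec_stock_list stocklist categories (stock_list stocklist categories)

-- ===== LEMMAS AND PROOFS =====

-- building {x: 0 for x in categories}: every stored value is 0
theorem pv_getD_fold_zero (cats : List String) (d : PySem.Dict String Int) (c : String)
    (h : d.getD c 0 = 0) : (cats.foldl (fun d x => d.insert x 0) d).getD c 0 = 0 := by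
  induction cats generalizing d with
  | nil => exact h
  | cons x xs ih =>
    simp only [List.foldl_cons]
    exact ih _ (by rw [PySem.Dict.getD_insert]; split <;> simp [h])

-- A's accumulation loop never changes which keys are present
theorem pv_loop_contains (l : List String) (d : PySem.Dict String Int) (k : String) :
    (l.foldl (fun d stock =>
      let category := pvKey stock
      if d.contains category then d.insert category (d.getD category 0 + pvCnt stock) else d) d).contains k
    = d.contains k := by
  induction l generalizing d with
  | nil => rfl
  | cons s l ih =>
    simp only [List.foldl_cons]
    split
    · rename_i hc
      rw [ih, PySem.Dict.contains_insert]
      by_cases hk : k = pvKey s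
      · subst hk; simp [hc]
      · simp [hk]
    · exact ih d

-- ... nor the key list itself
theorem pv_loop_keys (l : List String) (d : PySem.Dict String Int) :
    (l.foldl (fun d stock =>
      let category := pvKey stock
      if d.contains category then d.insert category (d.getD category 0 + pvCnt stock) else d) d).keys
    = d.keys := by
  induction l generalizing d with
  | nil => rfl
  | cons s l ih =>
    simp only [List.foldl_cons]
    split
    · rename_i hc; rw [ih, PySem.Dict.keys_insert_of_contains _ _ hc]
    · exact ih d

-- A's accumulation loop adds, at each present key c, the counts of the stocks keyed c
theorem pv_loop_getD (l : List String) (d : PySem.Dict String Int) (c : String)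
    (hc : d.contains c = true) :
    (l.foldl (fun d stock =>
      let category := pvKey stock
      if d.contains category then d.insert category (d.getD category 0 + pvCnt stock) else d) d).getD c 0
    = d.getD c 0 + ((l.filter (fun s => pvKey s == c)).map pvCnt).sum := by
  induction l generalizing d with
  | nil => simp
  | cons s l ih =>
    simp only [List.foldl_cons, List.filter_cons]
    by_cases hk : pvKey s = c
    · subst hk
      simp only [BEq.rfl, if_pos, hc, List.map_cons, List.sum_cons]
      rw [ih _ (by rw [PySem.Dict.contains_insert]; simp),
        PySem.Dict.getD_insert]
      simp [add_assoc]
    · have hbeq : (pvKey s == c) = false := by simp [hk]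
      rw [hbeq]
      simp only [Bool.false_eq_true, if_false]
      split
      · rename_i hcs
        rw [ih _ (by rw [PySem.Dict.contains_insert]; simp [hc]),
          PySem.Dict.getD_insert, if_neg (fun h => hk h.symm)]
      · exact ih d hc

-- lookup through a foldl of inserts whose keys avoid c
theorem pv_get?_foldl_insert_not_mem (l : List (String × Int)) (d : PySem.Dict String Int)
    (c : String) (h : c ∉ l.map Prod.fst) :
    (l.foldl (fun acc p => acc.insert p.1 p.2) d).get? c = d.get? c := by
  induction l generalizing d with
  | nil => rfl
  | cons p l ih =>
    simp only [List.map_cons, List.mem_cons, not_or] at h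
    simp only [List.foldl_cons]
    rw [ih _ h.2, PySem.Dict.get?_insert_of_ne _ _ h.1]

-- dict() of a pair list with distinct keys: lookup finds the listed value
theorem pv_get?_ofList (l : List (String × Int)) (c : String) (v : Int)
    (hnd : (l.map Prod.fst).Nodup) (hm : (c, v) ∈ l) :
    (PySem.Dict.ofList l).get? c = some v := by
  have : ∀ d : PySem.Dict String Int,
      (l.foldl (fun acc p => acc.insert p.1 p.2) d).get? c = some v := by
    induction l with
    | nil => cases hm
    | cons p l ih =>
      intro d
      simp only [List.map_cons, List.nodup_cons] at hnd
      simp only [List.foldl_cons]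
      rcases List.mem_cons.mp hm with h | h
      · rw [pv_get?_foldl_insert_not_mem _ _ _ (by simpa [← h] using hnd.1)]
        rw [← h, PySem.Dict.get?_insert_self]
      · exact ih hnd.2 h _
  exact this PySem.Dict.empty

-- B's inner loop is the same filtered sum
theorem pv_total_eq (c : String) (l : List String) (t : Int) :
    l.foldl (fun t s => if pvKey s == c then t + pvCnt s else t) t
    = t + ((l.filter (fun s => pvKey s == c)).map pvCnt).sum := by
  induction l generalizing t with
  | nil => simp
  | cons s l ih =>
    simp only [List.foldl_cons, List.filter_cons]
    by_cases hk : (pvKey s == c) = true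
    · rw [hk]; simp only [ih]; simp [add_assoc]
    · simp only [hk]; simp only [Bool.false_eq_true, if_false, ih]

-- ===== VERDICT (by name: the statement is the Claim_ definition above) =====
theorem stock_list_spec : Claim_equal_stock_list := by
  intro stocklist categories _ _
  unfold Spec_stock_list stock_list stock_list_alt
  by_cases hnil : stocklist = []
  · simp [hnil]
  · rw [if_neg hnil, if_neg hnil]
    rw [PySem.List.foldl_append_singleton_eq_map]
    dsimp only
    rw [List.nil_append]
    congr 1
    apply List.map_congr_left
    intro c hc
    -- the accumulator dict
    set res0 : PySem.Dict String Int :=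
      categories.foldl (fun d x => d.insert x 0) PySem.Dict.empty with hres0
    set res : PySem.Dict String Int :=
      stocklist.foldl (fun d stock =>
        let category := pvKey stock
        if d.contains category then d.insert category (d.getD category 0 + pvCnt stock) else d) res0
      with hres
    -- c is a key of res0, hence of res
    have hmem0 : c ∈ res0.keys := by
      rw [hres0, PySem.Dict.keys_foldl_insert categories (fun _ _ => (0 : Int))]
      rw [PySem.Set.mem_update]
      exact Or.inr hc
    have hc0 : res0.contains c = true := (PySem.Dict.contains_iff_mem_keys _ _).mpr hmem0
    have hcres : res.contains c = true := by
      rw [hres, pv_loop_contains]; exact hc0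
    -- the value A accumulates at c
    have hval : res.getD c 0 = ((stocklist.filter (fun s => pvKey s == c)).map pvCnt).sum := by
      rw [hres, pv_loop_getD _ _ _ hc0, pv_getD_fold_zero categories _ c (by simp), zero_add]
    -- res has Nodup keys
    have hnd : res.keys.Nodup := by
      rw [hres, pv_loop_keys, hres0]
      exact PySem.Dict.nodup_keys_foldl_insert categories (fun _ _ => (0 : Int))
        PySem.Dict.empty (by rw [PySem.Dict.keys_empty]; exact List.nodup_nil)
    -- the sorted rebuild preserves every lookup
    obtain ⟨v, hv⟩ : ∃ v, res.get? c = some v := by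
      have := PySem.Dict.contains_eq_isSome_get? res c
      rw [hcres] at this
      exact Option.isSome_iff_exists.mp this.symm
    have hvitem : (c, v) ∈ res.items := PySem.Dict.mem_items_of_get?_eq_some res hv
    have hperm := PySem.List.sorted_perm res.items (fun p => p.1) false
    have hvsort : (c, v) ∈ PySem.List.sorted res.items (fun p => p.1) := hperm.mem_iff.mpr hvitem
    have hndsort : ((PySem.List.sorted res.items (fun p => p.1)).map Prod.fst).Nodup := by
      refine ((hperm.map Prod.fst).nodup_iff).mpr ?_
      exact hnd
    have h2 : (PySem.Dict.ofList (PySem.List.sorted res.items (fun p => p.1))).getD c 0 = v := by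
      rw [PySem.Dict.getD_eq_get?_getD, pv_get?_ofList _ _ _ hndsort hvsort]; rfl
    have hresv : res.getD c 0 = v := by rw [PySem.Dict.getD_eq_get?_getD, hv]; rfl
    rw [h2, ← hresv, hval, pv_total_eq, zero_add]
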